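-- pv_equiv track=rewrite | github.com/immunoliugy/spatial_thymus_aging | slide_tcr_functions.py | get_locations_distribution
-- ===== SOURCE A (Python) =====
-- def get_locations_distribution(all_locations, locations_reference):
--     """Gets the cell types for a list of locations"""
--     lung_locs = set(locations_reference["Lung"])
--     til_locs = set(locations_reference["TIL Chemokines"])
--     tumor_locs = set(locations_reference["Tumor"])
--     ltt_dist = [0, 0, 0]
--
--     for location in all_locations:
--         if location in lung_locs:
--             ltt_dist[0] += 1
--
--         elif location in til_locs:
--             ltt_dist[1] += 1
--
--         elif location in tumor_locs:
--             ltt_dist[2] += 1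
--     return ltt_dist
-- ===== SOURCE B (Python) =====
-- def get_locations_distribution(all_locations, locations_reference):
--     """Gets the cell types for a list of locations"""
--     lung = set(locations_reference["Lung"])
--     til = set(locations_reference["TIL Chemokines"]) - lung
--     tumor = set(locations_reference["Tumor"]) - lung - til
--     return [sum(loc in cat for loc in all_locations) for cat in (lung, til, tumor)]
-- ===== Notes on version B (the rewrite author's own statement) =====
-- stated objective: alternative
-- what changed: Instead of one pass with an ordered elif cascade over three overlapping sets, B makes the categories disjoint up front by set differences (til minus lung, tumor minus lung and til), which encodes the Lung>TIL>Tumor precedence in the data, and then builds the result as three independent per-category counting passes over the locations.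
import Mathlib
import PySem

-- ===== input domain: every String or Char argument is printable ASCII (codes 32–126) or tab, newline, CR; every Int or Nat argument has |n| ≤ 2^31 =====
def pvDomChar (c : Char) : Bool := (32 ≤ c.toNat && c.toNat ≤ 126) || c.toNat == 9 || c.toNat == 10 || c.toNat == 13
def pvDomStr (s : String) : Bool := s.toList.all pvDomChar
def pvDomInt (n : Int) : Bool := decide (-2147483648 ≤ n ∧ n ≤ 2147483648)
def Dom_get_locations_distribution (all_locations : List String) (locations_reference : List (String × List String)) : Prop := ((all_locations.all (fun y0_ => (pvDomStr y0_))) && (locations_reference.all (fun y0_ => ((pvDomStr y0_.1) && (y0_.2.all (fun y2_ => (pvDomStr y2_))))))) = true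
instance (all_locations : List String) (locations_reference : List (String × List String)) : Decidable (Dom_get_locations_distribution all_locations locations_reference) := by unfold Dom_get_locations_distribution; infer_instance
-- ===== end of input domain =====

-- B replaces the one-pass elif cascade by disjoint category sets built with set
-- differences (encoding the Lung>TIL>Tumor precedence) and three independent
-- per-category counting passes; same cost, different structure.

-- ===== PORT A =====
def get_locations_distribution (all_locations : List String) (locations_reference : List (String × List String)) : List Int :=
  match (PySem.Dict.mk locations_reference).get? "Lung",
        (PySem.Dict.mk locations_reference).get? "TIL Chemokines",
        (PySem.Dict.mk locations_reference).get? "Tumor" with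
  | some lung, some til, some tumor =>
      let lung_locs := PySem.Set.ofList lung
      let til_locs := PySem.Set.ofList til
      let tumor_locs := PySem.Set.ofList tumor
      all_locations.foldl (fun ltt_dist location =>
        if location ∈ lung_locs then
          PySem.List.pySetD ltt_dist 0 (PySem.List.pyGetD ltt_dist 0 0 + 1)
        else if location ∈ til_locs then
          PySem.List.pySetD ltt_dist 1 (PySem.List.pyGetD ltt_dist 1 0 + 1)
        else if location ∈ tumor_locs then
          PySem.List.pySetD ltt_dist 2 (PySem.List.pyGetD ltt_dist 2 0 + 1)
        else ltt_dist) [0, 0, 0]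
  | _, _, _ => []   -- Python raises KeyError here; excluded by Pre_

-- ===== PORT B =====
-- sum(loc in cat for loc in all_locations)
def pvCatCount (all_locations : List String) (cat : PySem.Set String) : Int :=
  all_locations.foldl (fun acc loc => acc + (if PySem.Set.contains cat loc then 1 else 0)) 0

def get_locations_distribution_alt (all_locations : List String) (locations_reference : List (String × List String)) : List Int :=
  match (PySem.Dict.mk locations_reference).get? "Lung" with
  | none => []   -- Python raises KeyError here; excluded by Pre_
  | some l =>
  match (PySem.Dict.mk locations_reference).get? "TIL Chemokines" with
  | none => []
  | some t =>
  match (PySem.Dict.mk locations_reference).get? "Tumor" with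
  | none => []
  | some u =>
      let lung := PySem.Set.ofList l
      let til := PySem.Set.diff (PySem.Set.ofList t) lung
      let tumor := PySem.Set.diff (PySem.Set.diff (PySem.Set.ofList u) lung) til
      [lung, til, tumor].map (pvCatCount all_locations)

-- ===== PRECONDITION & SPEC =====
-- Python A raises KeyError unless all three category keys occur in locations_reference.
def Pre_get_locations_distribution (all_locations : List String) (locations_reference : List (String × List String)) : Prop :=
  "Lung" ∈ locations_reference.map Prod.fst ∧
  "TIL Chemokines" ∈ locations_reference.map Prod.fst ∧
  "Tumor" ∈ locations_reference.map Prod.fst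
instance (all_locations : List String) (locations_reference : List (String × List String)) : Decidable (Pre_get_locations_distribution all_locations locations_reference) := by unfold Pre_get_locations_distribution; infer_instance
def pvWitness_get_locations_distribution : List String × (List (String × List String)) :=
  (["a", "b"], [("Lung", ["a"]), ("TIL Chemokines", ["b"]), ("Tumor", [])])

def Spec_get_locations_distribution (all_locations : List String) (locations_reference : List (String × List String)) (out : List Int) : Prop := out = get_locations_distribution_alt all_locations locations_reference
instance (all_locations : List String) (locations_reference : List (String × List String)) (out : List Int) : Decidable (Spec_get_locations_distribution all_locations locations_reference out) := by unfold Spec_get_locations_distribution; infer_instance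

-- ===== CLAIM (what is proved, stated in full; the proofs are below) =====
def Claim_equal_get_locations_distribution : Prop := ∀ (all_locations : List String) (locations_reference : List (String × List String)), Dom_get_locations_distribution all_locations locations_reference → Pre_get_locations_distribution all_locations locations_reference → Spec_get_locations_distribution all_locations locations_reference (get_locations_distribution all_locations locations_reference)

-- ===== LEMMAS AND PROOFS =====

theorem get?_mk_isSome_of_mem (lr : List (String × List String)) :
    ∀ k : String, k ∈ lr.map Prod.fst → ((PySem.Dict.mk lr).get? k).isSome := by
  intro k hk
  induction lr with
  | nil => simp at hk
  | cons p rest ih =>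
      rw [PySem.Dict.get?_mk_cons]
      by_cases h : p.1 = k
      · simp [h]
      · simp only [List.map_cons, List.mem_cons] at hk
        have := ih (hk.resolve_left (fun h' => h h'.symm))
        simp [beq_iff_eq, h, this]

-- B's counting pass with a running accumulator equals n + countP
theorem pvCatCount_loop (xs : List String) (s : PySem.Set String) (n : Int) :
    xs.foldl (fun acc loc => acc + (if PySem.Set.contains s loc then 1 else 0)) n
      = n + (xs.countP (fun loc => PySem.Set.contains s loc) : Int) := by
  induction xs generalizing n with
  | nil => simp
  | cons x xs ih =>
      simp only [List.foldl_cons, ih, List.countP_cons]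
      by_cases h : PySem.Set.contains s x <;> simp [h] <;> omega

-- A's loop body as a named function (definitionally the lambda in the port of A)
def stepA (L T U : List String) (ltt_dist : List Int) (location : String) : List Int :=
  if location ∈ PySem.Set.ofList L then
    PySem.List.pySetD ltt_dist 0 (PySem.List.pyGetD ltt_dist 0 0 + 1)
  else if location ∈ PySem.Set.ofList T then
    PySem.List.pySetD ltt_dist 1 (PySem.List.pyGetD ltt_dist 1 0 + 1)
  else if location ∈ PySem.Set.ofList U then
    PySem.List.pySetD ltt_dist 2 (PySem.List.pyGetD ltt_dist 2 0 + 1)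
  else ltt_dist

theorem stepA_apply (L T U : List String) (a b c : Int) (x : String) :
    stepA L T U [a, b, c] x
      = if x ∈ L then [a + 1, b, c] else if x ∈ T then [a, b + 1, c]
        else if x ∈ U then [a, b, c + 1] else [a, b, c] := by
  by_cases h1 : x ∈ L <;> by_cases h2 : x ∈ T <;> by_cases h3 : x ∈ U <;>
    simp [stepA, h1, h2, h3, PySem.Set.mem_ofList, PySem.List.pySetD, PySem.List.pySet?,
          PySem.List.pyGetD, PySem.List.pyGet?, PySem.List.pyIdx?]

-- A's single pass unrolled into three countP's over the same list
theorem foldA_eq (L T U : List String) (xs : List String) (a b c : Int) :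
    xs.foldl (stepA L T U) [a, b, c]
      = [a + (xs.countP (fun x => decide (x ∈ L)) : Int),
         b + (xs.countP (fun x => decide (x ∉ L ∧ x ∈ T)) : Int),
         c + (xs.countP (fun x => decide (x ∉ L ∧ x ∉ T ∧ x ∈ U)) : Int)] := by
  induction xs generalizing a b c with
  | nil => simp
  | cons x xs ih =>
      rw [List.foldl_cons, stepA_apply]
      split_ifs with h1 h2 h3 <;> rw [ih] <;>
        simp [*] <;> push_cast <;> ring

theorem get_locations_distribution_spec : Claim_equal_get_locations_distribution := by
  intro all_locations lr _ hpre
  obtain ⟨hL, hT, hU⟩ := hpre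
  unfold Spec_get_locations_distribution get_locations_distribution get_locations_distribution_alt
  obtain ⟨l, hl⟩ := Option.isSome_iff_exists.mp (get?_mk_isSome_of_mem lr _ hL)
  obtain ⟨t, ht⟩ := Option.isSome_iff_exists.mp (get?_mk_isSome_of_mem lr _ hT)
  obtain ⟨u, hu⟩ := Option.isSome_iff_exists.mp (get?_mk_isSome_of_mem lr _ hU)
  rw [hl, ht, hu]
  simp only [List.map_cons, List.map_nil]
  rw [show (fun (ltt_dist : List Int) (location : String) =>
        if location ∈ PySem.Set.ofList l then
          PySem.List.pySetD ltt_dist 0 (PySem.List.pyGetD ltt_dist 0 0 + 1)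
        else if location ∈ PySem.Set.ofList t then
          PySem.List.pySetD ltt_dist 1 (PySem.List.pyGetD ltt_dist 1 0 + 1)
        else if location ∈ PySem.Set.ofList u then
          PySem.List.pySetD ltt_dist 2 (PySem.List.pyGetD ltt_dist 2 0 + 1)
        else ltt_dist) = stepA l t u from rfl, foldA_eq]
  unfold pvCatCount
  rw [pvCatCount_loop, pvCatCount_loop, pvCatCount_loop]
  have e1 : (all_locations.countP fun x => decide (x ∈ l))
      = all_locations.countP (fun loc => (PySem.Set.ofList l).contains loc) :=
    List.countP_congr (fun x _ => by simp [PySem.Set.mem_ofList])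
  have e2 : (all_locations.countP fun x => decide (x ∉ l ∧ x ∈ t))
      = all_locations.countP (fun loc => ((PySem.Set.ofList t).diff (PySem.Set.ofList l)).contains loc) :=
    List.countP_congr (fun x _ => by
      simp [PySem.Set.mem_diff, PySem.Set.mem_ofList, and_comm])
  have e3 : (all_locations.countP fun x => decide (x ∉ l ∧ x ∉ t ∧ x ∈ u))
      = all_locations.countP (fun loc =>
          (((PySem.Set.ofList u).diff (PySem.Set.ofList l)).diff
            ((PySem.Set.ofList t).diff (PySem.Set.ofList l))).contains loc) :=
    List.countP_congr (fun x _ => by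
      simp [PySem.Set.mem_diff, PySem.Set.mem_ofList]; tauto)
  simp only [zero_add, e1, e2, e3]

-- ===== VERDICT (by name: the statement is the Claim_ definition above) =====
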